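-- pv_equiv track=rewrite | github.com/fer7una/adelfinio | scripts/generate_episodes_from_plan.py | pick_story_roles
-- ===== SOURCE A (Python) =====
-- def pick_story_roles(cast_names: list[str]) -> dict:
--     lead = next((name for name in cast_names if "pelayo" in name.lower()), cast_names[0] if cast_names else "Pelayo")
--     rival = next((name for name in cast_names if "qama" in name.lower()), "Al Qama")
--     bishop = next((name for name in cast_names if "oppas" in name.lower() or "obispo" in name.lower()), "Don Oppas")
--     alfonso = next((name for name in cast_names if "alfonso" in name.lower()), "Alfonso")
--     ally = next(
--         (name for name in cast_names if name not in {lead, rival, bishop}),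
--         alfonso if alfonso not in {lead, rival, bishop} else "Guerrero astur",
--     )
--     return {
--         "lead": lead,
--         "rival": rival,
--         "bishop": bishop,
--         "ally": ally,
--         "captain": f"Capitan de {rival}",
--         "chronicle": "Cronista de Albelda",
--     }
-- ===== SOURCE B (Python) =====
-- def pick_story_roles(cast_names: list[str]) -> dict:
--     # One pass: record the first name matching each role predicate.
--     pelayo = qama = bishop_m = alfonso_m = None
--     for name in cast_names:
--         low = name.lower()
--         if pelayo is None and "pelayo" in low:
--             pelayo = name
--         if qama is None and "qama" in low:
--             qama = name
--         if bishop_m is None and ("oppas" in low or "obispo" in low):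
--             bishop_m = name
--         if alfonso_m is None and "alfonso" in low:
--             alfonso_m = name
--     lead = pelayo if pelayo is not None else (cast_names[0] if cast_names else "Pelayo")
--     rival = qama if qama is not None else "Al Qama"
--     bishop = bishop_m if bishop_m is not None else "Don Oppas"
--     alfonso = alfonso_m if alfonso_m is not None else "Alfonso"
--     taken = {lead, rival, bishop}
--     ally = None
--     for name in cast_names:
--         if name not in taken:
--             ally = name
--             break
--     if ally is None:
--         ally = alfonso if alfonso not in taken else "Guerrero astur"
--     return {
--         "lead": lead,
--         "rival": rival,
--         "bishop": bishop,
--         "ally": ally,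
--         "captain": f"Capitan de {rival}",
--         "chronicle": "Cronista de Albelda",
--     }
-- ===== Notes on version B (the rewrite author's own statement) =====
-- stated objective: faster
-- what changed: Replaces A's four independent generator scans over cast_names by a single pass that records the first match for each role predicate, followed by one explicit scan for the ally.
import Mathlib
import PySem

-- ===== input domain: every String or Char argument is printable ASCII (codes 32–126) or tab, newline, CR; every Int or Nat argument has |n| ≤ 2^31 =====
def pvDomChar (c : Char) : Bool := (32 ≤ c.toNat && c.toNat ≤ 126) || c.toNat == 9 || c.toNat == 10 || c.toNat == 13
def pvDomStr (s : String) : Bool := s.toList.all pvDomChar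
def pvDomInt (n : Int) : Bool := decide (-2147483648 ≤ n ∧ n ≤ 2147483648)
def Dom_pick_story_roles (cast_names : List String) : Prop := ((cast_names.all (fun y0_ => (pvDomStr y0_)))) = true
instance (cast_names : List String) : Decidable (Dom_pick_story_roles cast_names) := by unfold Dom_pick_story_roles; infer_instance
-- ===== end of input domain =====

-- B replaces A's four independent generator scans by one pass recording the first match per role
-- predicate, plus one explicit scan for the ally (objective: faster by a constant factor).

-- ===== PORT A =====
-- A: five `next(generator, default)` scans, each ported as List.find? with its default.
def pick_story_roles (cast_names : List String) : List (String × String) :=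
  let lead := (cast_names.find? (fun name => PySem.Str.isIn "pelayo" (PySem.Str.lower name))).getD
      (match cast_names with | [] => "Pelayo" | x :: _ => x)
  let rival := (cast_names.find? (fun name => PySem.Str.isIn "qama" (PySem.Str.lower name))).getD "Al Qama"
  let bishop := (cast_names.find? (fun name =>
      PySem.Str.isIn "oppas" (PySem.Str.lower name) || PySem.Str.isIn "obispo" (PySem.Str.lower name))).getD "Don Oppas"
  let alfonso := (cast_names.find? (fun name => PySem.Str.isIn "alfonso" (PySem.Str.lower name))).getD "Alfonso"
  let taken := PySem.Set.ofList [lead, rival, bishop]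
  let ally := (cast_names.find? (fun name => !(PySem.Set.contains taken name))).getD
      (if !(PySem.Set.contains taken alfonso) then alfonso else "Guerrero astur")
  [("lead", lead), ("rival", rival), ("bishop", bishop), ("ally", ally),
   ("captain", "Capitan de " ++ rival), ("chronicle", "Cronista de Albelda")]

-- ===== PORT B =====
-- `x = name if x is None and pred` inside B's loop
def pvUpd (o : Option String) (p : Bool) (n : String) : Option String :=
  match o with
  | some x => some x
  | none => if p then some n else none

-- B's single pass over cast_names, carrying the four first-match slots
def pvScan : List String → Option String × Option String × Option String × Option String →
    Option String × Option String × Option String × Option String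
  | [], s => s
  | name :: rest, (a, b, c, d) =>
    let low := PySem.Str.lower name
    pvScan rest (pvUpd a (PySem.Str.isIn "pelayo" low) name,
                 pvUpd b (PySem.Str.isIn "qama" low) name,
                 pvUpd c (PySem.Str.isIn "oppas" low || PySem.Str.isIn "obispo" low) name,
                 pvUpd d (PySem.Str.isIn "alfonso" low) name)

-- B's explicit ally scan with break
def pvFindAlly (taken : PySem.Set String) : List String → Option String
  | [] => none
  | name :: rest => if !(PySem.Set.contains taken name) then some name else pvFindAlly taken rest

def pick_story_roles_alt (cast_names : List String) : List (String × String) :=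
  let s := pvScan cast_names (none, none, none, none)
  let lead := s.1.getD (match cast_names with | [] => "Pelayo" | x :: _ => x)
  let rival := s.2.1.getD "Al Qama"
  let bishop := s.2.2.1.getD "Don Oppas"
  let alfonso := s.2.2.2.getD "Alfonso"
  let taken := PySem.Set.ofList [lead, rival, bishop]
  let ally := (pvFindAlly taken cast_names).getD
      (if !(PySem.Set.contains taken alfonso) then alfonso else "Guerrero astur")
  [("lead", lead), ("rival", rival), ("bishop", bishop), ("ally", ally),
   ("captain", "Capitan de " ++ rival), ("chronicle", "Cronista de Albelda")]

-- ===== PRECONDITION & SPEC =====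
def Spec_pick_story_roles (cast_names : List String) (out : List (String × String)) : Prop := out = pick_story_roles_alt cast_names
instance (cast_names : List String) (out : List (String × String)) : Decidable (Spec_pick_story_roles cast_names out) := by unfold Spec_pick_story_roles; infer_instance

-- ===== CLAIM (what is proved, stated in full; the proofs are below) =====
def Claim_equal_pick_story_roles : Prop := ∀ (cast_names : List String), Dom_pick_story_roles cast_names → Spec_pick_story_roles cast_names (pick_story_roles cast_names)

-- ===== LEMMAS AND PROOFS =====

theorem pvUpd_orElse (o : Option String) (q : String → Bool) (n : String) (l : List String) :
    (pvUpd o (q n) n).orElse (fun _ => l.find? q) = o.orElse (fun _ => (n :: l).find? q) := by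
  cases o with
  | some x => simp [pvUpd]
  | none =>
    simp only [pvUpd, List.find?_cons]
    cases h : q n <;> simp [h]

theorem pvScan_eq (l : List String) : ∀ (a b c d : Option String),
    pvScan l (a, b, c, d) =
      (a.orElse (fun _ => l.find? (fun n => PySem.Str.isIn "pelayo" (PySem.Str.lower n))),
       b.orElse (fun _ => l.find? (fun n => PySem.Str.isIn "qama" (PySem.Str.lower n))),
       c.orElse (fun _ => l.find? (fun n => PySem.Str.isIn "oppas" (PySem.Str.lower n) || PySem.Str.isIn "obispo" (PySem.Str.lower n))),
       d.orElse (fun _ => l.find? (fun n => PySem.Str.isIn "alfonso" (PySem.Str.lower n)))) := by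
  induction l with
  | nil => intro a b c d; cases a <;> cases b <;> cases c <;> cases d <;> simp [pvScan]
  | cons n t ih =>
    intro a b c d
    simp only [pvScan]
    rw [ih]
    refine congrArg₂ Prod.mk ?_ (congrArg₂ Prod.mk ?_ (congrArg₂ Prod.mk ?_ ?_))
    · exact pvUpd_orElse a (fun n => PySem.Str.isIn "pelayo" (PySem.Str.lower n)) n t
    · exact pvUpd_orElse b (fun n => PySem.Str.isIn "qama" (PySem.Str.lower n)) n t
    · exact pvUpd_orElse c (fun n => PySem.Str.isIn "oppas" (PySem.Str.lower n) || PySem.Str.isIn "obispo" (PySem.Str.lower n)) n t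
    · exact pvUpd_orElse d (fun n => PySem.Str.isIn "alfonso" (PySem.Str.lower n)) n t

theorem pvFindAlly_eq (taken : PySem.Set String) (l : List String) :
    pvFindAlly taken l = l.find? (fun n => !(PySem.Set.contains taken n)) := by
  induction l with
  | nil => simp [pvFindAlly]
  | cons n t ih =>
    simp only [pvFindAlly, List.find?_cons]
    cases h : (!(PySem.Set.contains taken n)) <;> simp [h, ih]

theorem orElse_none_getD (o : Option String) (d : String) :
    ((Option.none).orElse (fun _ => o)).getD d = o.getD d := by cases o <;> rfl

-- ===== VERDICT (by name: the statement is the Claim_ definition above) =====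
theorem pick_story_roles_spec : Claim_equal_pick_story_roles := by
  intro cast_names _
  unfold Spec_pick_story_roles pick_story_roles pick_story_roles_alt
  rw [pvScan_eq]
  simp only [pvFindAlly_eq, orElse_none_getD]
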